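-- pv_equiv track=rewrite | github.com/vkjfetr-bot/ACM | ACM/src/acm_observe.py | guardrail_state
-- ===== SOURCE A (Python) =====
-- from typing import Dict, Iterable, List, Optional
--
-- def guardrail_state(events: Iterable[Dict]) -> str:
--     state = "ok"
--     for evt in events:
--         if evt.get("acked"):
--             continue
--         level = (evt.get("level") or "").lower()
--         if level == "alert":
--             return "alert"
--         if level == "warn" and state != "alert":
--             state = "warn"
--     return state
-- ===== SOURCE B (Python) =====
-- def guardrail_state(events):
--     levels = {(e.get("level") or "").lower() for e in events if not e.get("acked")}
--     if "alert" in levels: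
--         return "alert"
--     if "warn" in levels:
--         return "warn"
--     return "ok"
-- ===== Notes on version B (the rewrite author's own statement) =====
-- stated objective: simpler
-- what changed: Replaced the early-exit running-state accumulator loop with a two-phase collect-then-decide structure: one pass builds the set of unacked levels, then the result is chosen by priority against that set.
import Mathlib
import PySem

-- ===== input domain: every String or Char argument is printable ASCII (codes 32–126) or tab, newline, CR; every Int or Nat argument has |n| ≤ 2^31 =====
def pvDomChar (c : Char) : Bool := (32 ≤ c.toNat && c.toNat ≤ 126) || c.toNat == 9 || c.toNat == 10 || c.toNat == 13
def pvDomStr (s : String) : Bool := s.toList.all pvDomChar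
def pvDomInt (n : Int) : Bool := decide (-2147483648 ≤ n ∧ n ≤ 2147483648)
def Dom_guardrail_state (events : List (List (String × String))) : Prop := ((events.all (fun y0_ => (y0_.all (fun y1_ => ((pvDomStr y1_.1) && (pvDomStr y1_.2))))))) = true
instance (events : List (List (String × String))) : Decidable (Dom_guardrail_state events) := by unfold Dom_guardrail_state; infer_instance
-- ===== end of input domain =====

-- B replaces A's early-exit running-state loop by a collect-then-decide two-phase structure (build the set of unacked levels, then pick by priority); objective: simpler.


-- ===== PORT A =====
-- evt.get(k): first-match lookup in the association list, via PySem.Dict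
def gsGet (evt : List (String × String)) (k : String) : Option String :=
  (PySem.Dict.mk evt).get? k

-- Python truthiness of evt.get("acked") : an Optional[str] is truthy iff some nonempty string
def gsTruthy (o : Option String) : Bool :=
  match o with
  | none => false
  | some s => s ≠ ""

-- (evt.get("level") or "").lower()  — 'x or ""' is getD "" since "" or "" = ""
def gsLevel (evt : List (String × String)) : String :=
  PySem.Str.lower ((gsGet evt "level").getD "")

-- the for-loop of A, carrying the running state, with early return on "alert"
def gsLoop : List (List (String × String)) → String → String
  | [], state => state
  | evt :: rest, state =>
    if gsTruthy (gsGet evt "acked") then gsLoop rest state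
    else
      let level := gsLevel evt
      if level = "alert" then "alert"
      else if level = "warn" ∧ state ≠ "alert" then gsLoop rest "warn"
      else gsLoop rest state

def guardrail_state (events : List (List (String × String))) : String :=
  gsLoop events "ok"

-- ===== PORT B =====
-- phase 1: the set comprehension {(e.get("level") or "").lower() for e in events if not e.get("acked")}
def gsLevels (events : List (List (String × String))) : PySem.Set String :=
  PySem.Set.ofList (events.filterMap (fun evt =>
    if gsTruthy (gsGet evt "acked") then none else some (gsLevel evt)))

-- phase 2: decide by priority against the collected set
def guardrail_state_alt (events : List (List (String × String))) : String :=
  let levels := gsLevels events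
  if PySem.Set.contains levels "alert" then "alert"
  else if PySem.Set.contains levels "warn" then "warn"
  else "ok"

-- ===== PRECONDITION & SPEC =====
def Spec_guardrail_state (events : List (List (String × String))) (out : String) : Prop := out = guardrail_state_alt events
instance (events : List (List (String × String))) (out : String) : Decidable (Spec_guardrail_state events out) := by unfold Spec_guardrail_state; infer_instance

-- ===== CLAIM (what is proved, stated in full; the proofs are below) =====
def Claim_equal_guardrail_state : Prop := ∀ (events : List (List (String × String))), Dom_guardrail_state events → Spec_guardrail_state events (guardrail_state events)

-- ===== LEMMAS AND PROOFS =====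

-- the raw list of levels B collects, before deduplication
def gsLevelList (events : List (List (String × String))) : List String :=
  events.filterMap (fun evt =>
    if gsTruthy (gsGet evt "acked") then none else some (gsLevel evt))

-- characterisation of A's loop for any non-"alert" running state
theorem gsLoop_eq (events : List (List (String × String))) :
    ∀ s, s ≠ "alert" →
      gsLoop events s =
        if "alert" ∈ gsLevelList events then "alert"
        else if "warn" ∈ gsLevelList events then "warn"
        else if s = "warn" then "warn" else s := by
  induction events with
  | nil => intro s _; simp [gsLoop, gsLevelList]
  | cons evt rest ih =>
    intro s hs
    by_cases hack : gsTruthy (gsGet evt "acked")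
    · simp [gsLoop, gsLevelList, hack, ih s hs]
    · by_cases hal : gsLevel evt = "alert"
      · simp [gsLoop, gsLevelList, hack, hal]
      · by_cases hw : gsLevel evt = "warn"
        · simp [gsLoop, gsLevelList, hack, hw, hs, ih "warn" (by decide)]
        · simp [gsLoop, gsLevelList, hack, hal, hw, Ne.symm hal, Ne.symm hw, ih s hs]

-- ===== VERDICT (by name: the statement is the Claim_ definition above) =====
theorem guardrail_state_spec : Claim_equal_guardrail_state := by
  intro events _
  unfold Spec_guardrail_state guardrail_state guardrail_state_alt
  rw [gsLoop_eq events "ok" (by decide)]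
  have h : gsLevels events = PySem.Set.ofList (gsLevelList events) := rfl
  by_cases ha : "alert" ∈ gsLevelList events
  · simp [h, PySem.Set.contains, PySem.Set.mem_ofList, ha]
  · by_cases hw : "warn" ∈ gsLevelList events
    · simp [h, PySem.Set.contains, PySem.Set.mem_ofList, ha, hw]
    · simp [h, PySem.Set.contains, PySem.Set.mem_ofList, ha, hw]
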